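-- pv_equiv track=rewrite | github.com/epeios-q37/epeios | tools/xdhq/examples/PYH/ReversiTuto/tools.py | has_my_piece
-- ===== SOURCE A (Python) =====
-- BLACK = -1
--
-- EMPTY = 0
--
-- WHITE = 1
--
-- def has_my_piece(board, bw, x, y, delta_x, delta_y):
--   "There is my piece in the direction of (delta_x, delta_y) from (x, y)."
--   assert bw in (BLACK, WHITE)
--   assert delta_x in (-1, 0, 1)
--   assert delta_y in (-1, 0, 1)
--   x += delta_x
--   y += delta_y
--
--   if x < 0 or x > 7 or y < 0 or y > 7 or board[x][y] == EMPTY: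
--     return False
--   if board[x][y] == bw:
--     return True
--   return has_my_piece(board, bw, x, y, delta_x, delta_y)
-- ===== SOURCE B (Python) =====
-- BLACK = -1
--
-- EMPTY = 0
--
-- WHITE = 1
--
-- def has_my_piece(board, bw, x, y, delta_x, delta_y):
--   "There is my piece in the direction of (delta_x, delta_y) from (x, y)."
--   assert bw in (BLACK, WHITE)
--   assert delta_x in (-1, 0, 1)
--   assert delta_y in (-1, 0, 1)
--   # stage 1: the on-board coordinates of the ray, in closed form (a ray has <= 8 cells)
--   coords = []
--   for k in range(1, 9):
--     cx, cy = x + k * delta_x, y + k * delta_y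
--     if not (0 <= cx <= 7 and 0 <= cy <= 7):
--       break
--     coords.append((cx, cy))
--   # stage 2: the first empty or own cell along the ray decides
--   for cx, cy in coords:
--     v = board[cx][cy]
--     if v == EMPTY:
--       return False
--     if v == bw:
--       return True
--   return False
-- ===== Notes on version B (the rewrite author's own statement) =====
-- stated objective: alternative
-- what changed: Replaces the tail recursion that mutates (x, y) by two staged passes: first collect the on-board ray coordinates in closed form (x+k*delta_x, y+k*delta_y for k=1..8, stopping at the board edge), then scan that list for the first empty or own cell; the bounded scan also terminates on the degenerate zero direction.
-- outside the precondition, e.g. on has_my_piece([[-1, 0], [0, 1]], 1, -1, -1, 1, 1): A returns True, B returns True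
import Mathlib
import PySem

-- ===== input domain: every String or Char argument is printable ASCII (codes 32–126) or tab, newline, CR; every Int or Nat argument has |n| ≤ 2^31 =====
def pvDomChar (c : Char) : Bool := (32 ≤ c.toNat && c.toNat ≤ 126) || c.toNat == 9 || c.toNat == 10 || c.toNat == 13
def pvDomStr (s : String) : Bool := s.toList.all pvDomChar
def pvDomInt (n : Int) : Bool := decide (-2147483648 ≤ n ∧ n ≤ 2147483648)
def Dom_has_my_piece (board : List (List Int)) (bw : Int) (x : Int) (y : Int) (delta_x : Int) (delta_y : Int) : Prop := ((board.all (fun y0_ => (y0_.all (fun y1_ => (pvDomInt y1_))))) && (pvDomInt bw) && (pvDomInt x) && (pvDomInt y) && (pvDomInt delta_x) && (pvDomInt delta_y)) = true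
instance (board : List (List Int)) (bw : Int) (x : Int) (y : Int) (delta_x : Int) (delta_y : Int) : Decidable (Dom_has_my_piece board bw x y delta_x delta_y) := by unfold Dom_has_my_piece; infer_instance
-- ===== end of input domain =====

-- B replaces A's tail recursion (mutating x,y) by two staged passes: first collect the
-- on-board ray coordinates in closed form, then scan that list for the first deciding cell.


-- ===== PORT A =====
-- A recurses after stepping x += dx, y += dy; on Pre_ the recursion depth is at most 9,
-- so fuel 20 is never exhausted there (the fuel only makes the transliteration total).
-- A 'none' cell lookup is a Python IndexError (excluded by Pre_); the port returns false there.
def pvGoA (fuel : Nat) (board : List (List Int)) (bw : Int) (x : Int) (y : Int) (delta_x : Int) (delta_y : Int) : Bool :=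
  match fuel with
  | 0 => false
  | f + 1 =>
    let x1 := x + delta_x
    let y1 := y + delta_y
    if x1 < 0 ∨ 7 < x1 ∨ y1 < 0 ∨ 7 < y1 then false
    else
      match PySem.List.pyGet? board x1 with
      | none => false
      | some row =>
        match PySem.List.pyGet? row y1 with
        | none => false
        | some v =>
          if v = 0 then false
          else if v = bw then true
          else pvGoA f board bw x1 y1 delta_x delta_y

def has_my_piece (board : List (List Int)) (bw : Int) (x : Int) (y : Int) (delta_x : Int) (delta_y : Int) : Bool :=
  pvGoA 20 board bw x y delta_x delta_y

-- ===== PORT B =====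
-- Stage 1 of Source B: the on-board coordinates (x+k·dx, y+k·dy) for k = start, start+1, …
-- while they stay in 0..7, with the loop's remaining iteration count as structural fuel.
def pvRayCoords (x : Int) (y : Int) (delta_x : Int) (delta_y : Int) : Nat → Int → List (Int × Int)
  | 0, _ => []
  | n + 1, k =>
    let cx := x + k * delta_x
    let cy := y + k * delta_y
    if 0 ≤ cx ∧ cx ≤ 7 ∧ 0 ≤ cy ∧ cy ≤ 7 then
      (cx, cy) :: pvRayCoords x y delta_x delta_y n (k + 1)
    else []

-- Stage 2 of Source B: the first empty or own cell in the collected list decides.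
-- A 'none' cell lookup is a Python IndexError (excluded by Pre_); the port returns false there.
def pvScanRay (board : List (List Int)) (bw : Int) : List (Int × Int) → Bool
  | [] => false
  | (cx, cy) :: rest =>
    match PySem.List.pyGet? board cx with
    | none => false
    | some row =>
      match PySem.List.pyGet? row cy with
      | none => false
      | some v =>
        if v = 0 then false
        else if v = bw then true
        else pvScanRay board bw rest

def has_my_piece_alt (board : List (List Int)) (bw : Int) (x : Int) (y : Int) (delta_x : Int) (delta_y : Int) : Bool :=
  pvScanRay board bw (pvRayCoords x y delta_x delta_y 8 1)

-- ===== PRECONDITION & SPEC =====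
-- Pre_ = the asserts hold, and either the very first step already leaves the board (no cell
-- is ever read), or the first ray cell exists and already decides the answer (it is empty or
-- holds an own piece), or the board is a full 8×8 Reversi grid whose zero-direction degenerate
-- case aimed at a non-empty opponent cell is excluded: on other non-8×8 boards A can raise
-- IndexError (on some of them A still returns a value B matches — see the cite), and on the
-- excluded zero-direction case A recurses forever on the same cell (RecursionError).
def Pre_has_my_piece (board : List (List Int)) (bw : Int) (x : Int) (y : Int) (delta_x : Int) (delta_y : Int) : Prop :=
  (bw = -1 ∨ bw = 1) ∧
  (delta_x = -1 ∨ delta_x = 0 ∨ delta_x = 1) ∧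
  (delta_y = -1 ∨ delta_y = 0 ∨ delta_y = 1) ∧
  (¬(0 ≤ x + delta_x ∧ x + delta_x ≤ 7 ∧ 0 ≤ y + delta_y ∧ y + delta_y ≤ 7) ∨
    (0 ≤ x + delta_x ∧ x + delta_x ≤ 7 ∧ 0 ≤ y + delta_y ∧ y + delta_y ≤ 7 ∧
      x + delta_x < (board.length : Int) ∧
      y + delta_y < ((PySem.List.pyGetD board (x + delta_x) []).length : Int) ∧
      (PySem.List.pyGetD (PySem.List.pyGetD board (x + delta_x) []) (y + delta_y) 0 = 0 ∨
        PySem.List.pyGetD (PySem.List.pyGetD board (x + delta_x) []) (y + delta_y) 0 = bw)) ∨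
    (board.length = 8 ∧ (∀ row ∈ board, row.length = 8) ∧
      ¬(delta_x = 0 ∧ delta_y = 0 ∧ 0 ≤ x ∧ x ≤ 7 ∧ 0 ≤ y ∧ y ≤ 7 ∧
          PySem.List.pyGetD (PySem.List.pyGetD board x []) y 0 ≠ 0 ∧
          PySem.List.pyGetD (PySem.List.pyGetD board x []) y 0 ≠ bw)))

instance (board : List (List Int)) (bw : Int) (x : Int) (y : Int) (delta_x : Int) (delta_y : Int) : Decidable (Pre_has_my_piece board bw x y delta_x delta_y) := by unfold Pre_has_my_piece; infer_instance

def pvWitness_has_my_piece : List (List Int) × Int × Int × Int × Int × Int :=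
  ([[0,0,0,0,0,0,0,0],[0,0,0,0,0,0,0,0],[0,0,0,0,0,0,0,0],[0,0,0,1,-1,0,0,0],
    [0,0,0,-1,1,0,0,0],[0,0,0,0,0,0,0,0],[0,0,0,0,0,0,0,0],[0,0,0,0,0,0,0,0]],
   1, 3, 3, 1, 0)

def Spec_has_my_piece (board : List (List Int)) (bw : Int) (x : Int) (y : Int) (delta_x : Int) (delta_y : Int) (out : Bool) : Prop := out = has_my_piece_alt board bw x y delta_x delta_y
instance (board : List (List Int)) (bw : Int) (x : Int) (y : Int) (delta_x : Int) (delta_y : Int) (out : Bool) : Decidable (Spec_has_my_piece board bw x y delta_x delta_y out) := by unfold Spec_has_my_piece; infer_instance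

-- ===== CLAIM (what is proved, stated in full; the proofs are below) =====
def Claim_equal_has_my_piece : Prop := ∀ (board : List (List Int)) (bw : Int) (x : Int) (y : Int) (delta_x : Int) (delta_y : Int), Dom_has_my_piece board bw x y delta_x delta_y → Pre_has_my_piece board bw x y delta_x delta_y → Spec_has_my_piece board bw x y delta_x delta_y (has_my_piece board bw x y delta_x delta_y)


-- ===== LEMMAS AND PROOFS =====

-- the main induction: with (dx,dy) ≠ (0,0) on a full 8×8 board, starting m cells before the
-- end of the ray, A's recursion from (x+(8-m)·dx, y+(8-m)·dy) agrees with B's scan of the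
-- coordinates collected from k = 9-m on with fuel m
theorem pv_main (board : List (List Int)) (bw x y delta_x delta_y : Int)
    (_hbw : bw = -1 ∨ bw = 1)
    (hdx : delta_x = -1 ∨ delta_x = 0 ∨ delta_x = 1)
    (hdy : delta_y = -1 ∨ delta_y = 0 ∨ delta_y = 1)
    (hlen : board.length = 8) (hrows : ∀ row ∈ board, row.length = 8)
    (hne : ¬(delta_x = 0 ∧ delta_y = 0)) :
    ∀ (m : Nat), m ≤ 8 → ∀ (fuel : Nat), m + 1 ≤ fuel →
      (m = 8 ∨ (0 ≤ x + delta_x ∧ x + delta_x ≤ 7 ∧ 0 ≤ y + delta_y ∧ y + delta_y ≤ 7)) →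
      pvGoA fuel board bw (x + ((8 : Int) - m) * delta_x) (y + ((8 : Int) - m) * delta_y) delta_x delta_y
        = pvScanRay board bw (pvRayCoords x y delta_x delta_y m ((9 : Int) - m)) := by
  intro m
  induction m with
  | zero =>
    intro _ fuel hfuel hside
    have hinb : 0 ≤ x + delta_x ∧ x + delta_x ≤ 7 ∧ 0 ≤ y + delta_y ∧ y + delta_y ≤ 7 := by
      rcases hside with h | h
      · omega
      · exact h
    obtain ⟨f, rfl⟩ : ∃ f, fuel = f + 1 := ⟨fuel - 1, by omega⟩
    simp only [pvRayCoords, pvScanRay, pvGoA]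
    rw [if_pos]
    rcases hdx with h | h | h <;> rcases hdy with h' | h' | h' <;> subst h h' <;>
      simp_all <;> omega
  | succ m ih =>
    intro hm8 fuel hfuel hside
    obtain ⟨f, rfl⟩ : ∃ f, fuel = f + 1 := ⟨fuel - 1, by omega⟩
    simp only [pvRayCoords, pvGoA]
    have hxe : x + ((8 : Int) - ((m + 1 : Nat) : Int)) * delta_x + delta_x
        = x + ((9 : Int) - ((m + 1 : Nat) : Int)) * delta_x := by ring
    have hye : y + ((8 : Int) - ((m + 1 : Nat) : Int)) * delta_y + delta_y
        = y + ((9 : Int) - ((m + 1 : Nat) : Int)) * delta_y := by ring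
    rw [hxe, hye]
    by_cases hin : 0 ≤ x + ((9 : Int) - ((m + 1 : Nat) : Int)) * delta_x ∧
        x + ((9 : Int) - ((m + 1 : Nat) : Int)) * delta_x ≤ 7 ∧
        0 ≤ y + ((9 : Int) - ((m + 1 : Nat) : Int)) * delta_y ∧
        y + ((9 : Int) - ((m + 1 : Nat) : Int)) * delta_y ≤ 7
    · rw [if_neg (by omega), if_pos hin]
      simp only [pvScanRay]
      obtain ⟨hcx0, hcx7, hcy0, hcy7⟩ := hin
      have hl8 : ((board.length : Nat) : Int) = 8 := by rw [hlen]; rfl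
      obtain ⟨row, hr1⟩ : ∃ row, PySem.List.pyGet? board
          (x + ((9 : Int) - ((m + 1 : Nat) : Int)) * delta_x) = some row :=
        ⟨_, PySem.List.pyGet?_eq_some_getElem (xs := board) (i := x + ((9 : Int) - ((m + 1 : Nat) : Int)) * delta_x) hcx0 (by omega)⟩
      have hrl : row.length = 8 := hrows row (PySem.List.mem_of_pyGet?_eq_some board hr1)
      have hrl8 : ((row.length : Nat) : Int) = 8 := by rw [hrl]; rfl
      obtain ⟨v, hv⟩ : ∃ v, PySem.List.pyGet? row
          (y + ((9 : Int) - ((m + 1 : Nat) : Int)) * delta_y) = some v :=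
        ⟨_, PySem.List.pyGet?_eq_some_getElem (xs := row) (i := y + ((9 : Int) - ((m + 1 : Nat) : Int)) * delta_y) hcy0 (by omega)⟩
      simp only [hr1, hv]
      by_cases hv0 : v = 0
      · rw [if_pos hv0, if_pos hv0]
      · rw [if_neg hv0, if_neg hv0]
        by_cases hvb : v = bw
        · rw [if_pos hvb, if_pos hvb]
        · rw [if_neg hvb, if_neg hvb]
          have hstep : ((9 : Int) - ((m + 1 : Nat) : Int)) + 1 = (9 : Int) - ((m : Nat) : Int) := by
            push_cast; ring
          have hco : x + ((9 : Int) - ((m + 1 : Nat) : Int)) * delta_x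
              = x + ((8 : Int) - ((m : Nat) : Int)) * delta_x := by push_cast; ring
          have hco' : y + ((9 : Int) - ((m + 1 : Nat) : Int)) * delta_y
              = y + ((8 : Int) - ((m : Nat) : Int)) * delta_y := by push_cast; ring
          rw [hstep, hco, hco']
          apply ih (by omega) f (by omega)
          right
          rcases hside with h8 | hinb
          · have hm7 : m = 7 := by omega
            subst hm7
            have e1 : x + ((9 : Int) - ((7 + 1 : Nat) : Int)) * delta_x = x + delta_x := by
              push_cast; ring
            have e2 : y + ((9 : Int) - ((7 + 1 : Nat) : Int)) * delta_y = y + delta_y := by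
              push_cast; ring
            rw [e1] at hcx0 hcx7
            rw [e2] at hcy0 hcy7
            exact ⟨hcx0, hcx7, hcy0, hcy7⟩
          · exact hinb
    · rw [if_pos (by omega), if_neg hin]
      simp only [pvScanRay]

theorem has_my_piece_spec : Claim_equal_has_my_piece := by
  intro board bw x y delta_x delta_y _ hpre
  obtain ⟨hbw, hdx, hdy, hrest⟩ := hpre
  unfold Spec_has_my_piece has_my_piece has_my_piece_alt
  rcases hrest with hoob | ⟨hx0, hx7, hy0, hy7, hxl, hyl, hv1⟩ | ⟨hlen, hrows, hdeg⟩
  · -- the very first step leaves the board: A answers False at once, B collects no cell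
    simp only [pvRayCoords, pvGoA, one_mul]
    rw [if_pos (by omega), if_neg (by omega)]
    simp only [pvScanRay]
  · -- the first ray cell exists and is empty or an own piece: both decide on it at once
    simp only [pvRayCoords, pvGoA, one_mul]
    have hbw0 : bw ≠ 0 := by rcases hbw with h | h <;> simp [h]
    have hgA : ¬(x + delta_x < 0 ∨ 7 < x + delta_x ∨ y + delta_y < 0 ∨ 7 < y + delta_y) := by
      omega
    have hgB : 0 ≤ x + delta_x ∧ x + delta_x ≤ 7 ∧ 0 ≤ y + delta_y ∧ y + delta_y ≤ 7 :=
      ⟨hx0, hx7, hy0, hy7⟩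
    rw [if_neg hgA, if_pos hgB]
    simp only [pvScanRay]
    have hrow := PySem.List.pyGet?_eq_some_getElem (xs := board) (i := x + delta_x) hx0 hxl
    have hgd1 : PySem.List.pyGetD board (x + delta_x) [] = board[(x + delta_x).toNat]'(by omega) :=
      PySem.List.pyGetD_eq_getElem board [] hx0 hxl
    rw [hgd1] at hyl hv1
    have hcell := PySem.List.pyGet?_eq_some_getElem
      (xs := board[(x + delta_x).toNat]'(by omega)) (i := y + delta_y) hy0 hyl
    have hgd2 : PySem.List.pyGetD (board[(x + delta_x).toNat]'(by omega)) (y + delta_y) 0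
        = (board[(x + delta_x).toNat]'(by omega))[(y + delta_y).toNat]'(by omega) :=
      PySem.List.pyGetD_eq_getElem _ 0 hy0 hyl
    rw [hgd2] at hv1
    simp only [hrow, hcell]
    rcases hv1 with hv | hv
    · rw [if_pos hv, if_pos hv]
    · have hn0 : ¬((board[(x + delta_x).toNat]'(by omega))[(y + delta_y).toNat]'(by omega) = 0) := by
        rw [hv]; exact hbw0
      rw [if_neg hn0, if_pos hv, if_neg hn0, if_pos hv]
  by_cases hzz : delta_x = 0 ∧ delta_y = 0
  · obtain ⟨h1, h2⟩ := hzz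
    subst h1 h2
    simp only [pvRayCoords, pvGoA, mul_zero, add_zero]
    by_cases hin : 0 ≤ x ∧ x ≤ 7 ∧ 0 ≤ y ∧ y ≤ 7
    · obtain ⟨hx0, hx7, hy0, hy7⟩ := hin
      have hl8 : ((board.length : Nat) : Int) = 8 := by rw [hlen]; rfl
      have hbw0 : bw ≠ 0 := by rcases hbw with h | h <;> simp [h]
      have hgA : ¬(x < 0 ∨ 7 < x ∨ y < 0 ∨ 7 < y) := by omega
      have hgB : 0 ≤ x ∧ x ≤ 7 ∧ 0 ≤ y ∧ y ≤ 7 := ⟨hx0, hx7, hy0, hy7⟩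
      rw [if_neg hgA, if_pos hgB]
      simp only [pvScanRay]
      have hrow := PySem.List.pyGet?_eq_some_getElem (xs := board) (i := x) hx0 (by omega)
      have hrl : (board[x.toNat]'(by omega)).length = 8 :=
        hrows _ (List.getElem_mem _)
      have hrl8 : (((board[x.toNat]'(by omega)).length : Nat) : Int) = 8 := by rw [hrl]; rfl
      have hcell := PySem.List.pyGet?_eq_some_getElem
        (xs := board[x.toNat]'(by omega)) (i := y) hy0 (by omega)
      simp only [hrow, hcell]
      have hgd1 : PySem.List.pyGetD board x [] = board[x.toNat]'(by omega) :=
        PySem.List.pyGetD_eq_getElem board [] hx0 (by omega)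
      have hgd2 : PySem.List.pyGetD (board[x.toNat]'(by omega)) y 0
          = (board[x.toNat]'(by omega))[y.toNat]'(by omega) :=
        PySem.List.pyGetD_eq_getElem _ 0 hy0 (by omega)
      have hv : (board[x.toNat]'(by omega))[y.toNat]'(by omega) = 0 ∨
          (board[x.toNat]'(by omega))[y.toNat]'(by omega) = bw := by
        by_contra hc
        push Not at hc
        exact hdeg ⟨rfl, rfl, hx0, hx7, hy0, hy7,
          by rw [hgd1, hgd2]; exact hc.1, by rw [hgd1, hgd2]; exact hc.2⟩
      rcases hv with hv | hv
      · rw [if_pos hv, if_pos hv]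
      · have hn0 : ¬((board[x.toNat]'(by omega))[y.toNat]'(by omega) = 0) := by
          rw [hv]; exact hbw0
        rw [if_neg hn0, if_pos hv, if_neg hn0, if_pos hv]
    · rw [if_pos (by omega), if_neg hin]
      simp only [pvScanRay]
  · have h := pv_main board bw x y delta_x delta_y hbw hdx hdy hlen hrows hzz
      8 le_rfl 20 (by norm_num) (Or.inl rfl)
    norm_num at h
    exact h
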